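-- pv_equiv track=rewrite | github.com/UChicagoSUPERgroup/tapdebug | iot-autotap/autotapta/analyze/Rank.py | getRuleCoverage
-- ===== SOURCE A (Python) =====
-- def getRuleCoverage(trigger_time_list, actual_time_list, time_span: int=1200):
--     TP = 0
--     for action_time in actual_time_list:
--         for trigger_time in trigger_time_list:
--             if abs(trigger_time-action_time) < time_span:
--                 TP += 1
--                 break
--     return TP
-- ===== SOURCE B (Python) =====
-- def getRuleCoverage(trigger_time_list, actual_time_list, time_span: int = 1200):
--     # Sort trigger times once, then binary-search each action's window.
--     ts = sorted(trigger_time_list)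
--     n = len(ts)
--     TP = 0
--     for action_time in actual_time_list:
--         x = action_time - time_span + 1  # smallest integer t with abs(t - action_time) < time_span
--         lo, hi = 0, n                    # hand-written bisect_left (module imports none)
--         while lo < hi:
--             mid = (lo + hi) // 2
--             if ts[mid] < x:
--                 lo = mid + 1
--             else:
--                 hi = mid
--         if lo < n and ts[lo] < action_time + time_span:
--             TP += 1
--     return TP
-- ===== Notes on version B (the rewrite author's own statement) =====
-- stated objective: faster
-- what changed: Instead of scanning all trigger times for every action, B sorts the trigger times once and binary-searches (bisect_left) for a trigger inside each action's window.
import Mathlib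
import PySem

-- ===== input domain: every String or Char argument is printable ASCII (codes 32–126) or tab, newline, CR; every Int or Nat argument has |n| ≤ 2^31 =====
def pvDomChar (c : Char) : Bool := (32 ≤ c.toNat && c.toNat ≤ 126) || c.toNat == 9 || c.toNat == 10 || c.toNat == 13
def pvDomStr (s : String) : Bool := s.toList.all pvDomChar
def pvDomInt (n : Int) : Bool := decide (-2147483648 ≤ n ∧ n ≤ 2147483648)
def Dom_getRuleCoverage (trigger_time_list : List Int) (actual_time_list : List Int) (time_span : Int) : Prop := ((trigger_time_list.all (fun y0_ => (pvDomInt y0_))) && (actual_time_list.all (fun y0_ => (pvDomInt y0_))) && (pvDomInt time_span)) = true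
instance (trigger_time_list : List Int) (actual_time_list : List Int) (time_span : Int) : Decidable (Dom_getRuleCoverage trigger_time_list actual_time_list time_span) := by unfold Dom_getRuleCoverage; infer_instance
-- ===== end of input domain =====

-- B replaces A's inner linear scan by sorting the trigger times once and binary-searching
-- each action's window; equivalence of the RETURN value is proved for all inputs.

-- ===== PORT A =====
-- inner 'for trigger_time in trigger_time_list: … break' loop: returns whether it breaks
def pvInnerA (trigger_time_list : List Int) (action_time : Int) (time_span : Int) : Bool :=
  match trigger_time_list with
  | [] => false
  | trigger_time :: rest =>
      if |trigger_time - action_time| < time_span then true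
      else pvInnerA rest action_time time_span

def getRuleCoverage (trigger_time_list : List Int) (actual_time_list : List Int) (time_span : Int) : Int :=
  actual_time_list.foldl
    (fun TP action_time =>
      if pvInnerA trigger_time_list action_time time_span then TP + 1 else TP) 0

-- ===== PORT B =====
-- Source B's hand-written while-loop is exactly bisect_left; ported as PySem.List.bisectLeft (same loop)
def getRuleCoverage_alt (trigger_time_list : List Int) (actual_time_list : List Int) (time_span : Int) : Int :=
  let ts := PySem.List.sorted trigger_time_list (fun t => t) false
  let n := ts.length
  actual_time_list.foldl
    (fun TP action_time =>
      let lo := PySem.List.bisectLeft ts (action_time - time_span + 1)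
      if lo < n ∧ ts.getD lo 0 < action_time + time_span then TP + 1 else TP) 0

-- ===== PRECONDITION & SPEC =====
def Spec_getRuleCoverage (trigger_time_list : List Int) (actual_time_list : List Int) (time_span : Int) (out : Int) : Prop := out = getRuleCoverage_alt trigger_time_list actual_time_list time_span
instance (trigger_time_list : List Int) (actual_time_list : List Int) (time_span : Int) (out : Int) : Decidable (Spec_getRuleCoverage trigger_time_list actual_time_list time_span out) := by unfold Spec_getRuleCoverage; infer_instance

-- ===== CLAIM (what is proved, stated in full; the proofs are below) =====
def Claim_equal_getRuleCoverage : Prop := ∀ (trigger_time_list : List Int) (actual_time_list : List Int) (time_span : Int), Dom_getRuleCoverage trigger_time_list actual_time_list time_span → Spec_getRuleCoverage trigger_time_list actual_time_list time_span (getRuleCoverage trigger_time_list actual_time_list time_span)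

-- ===== LEMMAS AND PROOFS =====

-- A's inner loop breaks iff some trigger is within the window
theorem pvInnerA_iff (ts : List Int) (a span : Int) :
    pvInnerA ts a span = true ↔ ∃ t ∈ ts, |t - a| < span := by
  have : pvInnerA ts a span = ts.any (fun t => |t - a| < span) := by
    induction ts with
    | nil => simp [pvInnerA]
    | cons x rest ih => simp only [pvInnerA, List.any_cons]; split_ifs with h <;> simp [h, ih]
  rw [this, List.any_eq_true]; simp

-- B's bisect test succeeds iff some trigger is within the window
theorem pvHit_iff (trigger_time_list : List Int) (a span : Int) :
    (PySem.List.bisectLeft (PySem.List.sorted trigger_time_list (fun t => t) false) (a - span + 1) <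
        (PySem.List.sorted trigger_time_list (fun t => t) false).length ∧
      (PySem.List.sorted trigger_time_list (fun t => t) false).getD
        (PySem.List.bisectLeft (PySem.List.sorted trigger_time_list (fun t => t) false) (a - span + 1)) 0 <
        a + span) ↔
    ∃ t ∈ trigger_time_list, |t - a| < span := by
  set ts := PySem.List.sorted trigger_time_list (fun t => t) false with hts
  have hperm : ts.Perm trigger_time_list := PySem.List.sorted_perm _ _ _
  have hpw : List.Pairwise (fun x y : Int => x ≤ y) ts := by
    simpa using PySem.List.sorted_pairwise trigger_time_list (fun t => t)
  set x := a - span + 1 with hx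
  obtain ⟨hlen, hlt, hge⟩ := PySem.List.bisectLeft_spec ts x hpw
  set i := PySem.List.bisectLeft ts x with hi
  constructor
  · rintro ⟨hin, hub⟩
    refine ⟨ts[i], hperm.mem_iff.mp (List.getElem_mem hin), ?_⟩
    have := hge i hin le_rfl
    have : x ≤ ts[i] := this
    rw [List.getD_eq_getElem ts 0 hin] at hub
    rw [abs_lt]; omega
  · rintro ⟨t, htmem, hclose⟩
    rw [abs_lt] at hclose
    obtain ⟨j, hj, hjt⟩ := List.mem_iff_getElem.mp (hperm.mem_iff.mpr htmem)
    have hij : i ≤ j := by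
      by_contra hlt'
      have := hlt j hj (by omega)
      rw [hjt] at this
      omega
    have hin : i < ts.length := lt_of_le_of_lt hij hj
    refine ⟨hin, ?_⟩
    have hmono : ts[i] ≤ ts[j] := by
      rcases eq_or_lt_of_le hij with rfl | hij'
      · exact le_refl _
      · exact (List.pairwise_iff_getElem.mp hpw) i j hin hj hij'
    rw [hjt] at hmono
    rw [List.getD_eq_getElem ts 0 hin]
    omega

-- ===== VERDICT (by name: the statement is the Claim_ definition above) =====
theorem getRuleCoverage_spec : Claim_equal_getRuleCoverage := by
  intro ts as span _
  unfold Spec_getRuleCoverage getRuleCoverage getRuleCoverage_alt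
  refine List.foldl_ext _ _ 0 ?_
  intro TP a _
  by_cases h : ∃ t ∈ ts, |t - a| < span
  · rw [if_pos ((pvInnerA_iff ts a span).mpr h), if_pos ((pvHit_iff ts a span).mpr h)]
  · rw [if_neg (fun hc => h ((pvInnerA_iff ts a span).mp hc)),
        if_neg (fun hc => h ((pvHit_iff ts a span).mp hc))]
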